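-- pv_equiv track=rewrite | github.com/zyghost119/deviYuan | Stock/Data/Engine/DyStockDbCache.py | _getMissingDaysDates
-- ===== SOURCE A (Python) =====
-- def _getMissingDaysDates(rangeDays, days):
--     """
--         @rangDays: [date]
--         @days: [date]
--         get missing days dates in @rangeDays via @days
--         @return: [[start date, end date]]
--     """
--     retDays = [] # @return
--     days = set(days)
--     start, end = None, None # assume we're in existing state
--     for day in rangeDays:
--         if start is None: # We're in existing state
--             if day not in days:
--                 start = day
--                 end = day
--         else: # We're in missing state
--             if day not in days:
--                 end = day # just move end of missing day
--             else:
--                 retDays.append([start, end])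
--                 start, end = None, None
--
--     # check the last
--     if start is not None:
--         retDays.append([start, end])
--
--     return retDays
-- ===== SOURCE B (Python) =====
-- def _getMissingDaysDates(rangeDays, days):
--     """Run-extraction re-implementation: for each maximal run of missing days
--     rangeDays[i..j], emit [rangeDays[i], rangeDays[j]] directly; no
--     present/missing state variables and no trailing flush branch."""
--     dset = set(days)
--     ret = []
--     i, n = 0, len(rangeDays)
--     while i < n:
--         if rangeDays[i] in dset:
--             i += 1
--         else:
--             j = i
--             while j + 1 < n and rangeDays[j + 1] not in dset:
--                 j += 1
--             ret.append([rangeDays[i], rangeDays[j]])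
--             i = j + 1
--     return ret
-- ===== Notes on version B (the rewrite author's own statement) =====
-- stated objective: alternative
-- what changed: Replaced A's present/missing state machine (start/end state variables plus a trailing flush branch) with direct run extraction: scan to the end j of each maximal missing run and emit [rangeDays[i], rangeDays[j]] immediately.
import Mathlib
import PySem

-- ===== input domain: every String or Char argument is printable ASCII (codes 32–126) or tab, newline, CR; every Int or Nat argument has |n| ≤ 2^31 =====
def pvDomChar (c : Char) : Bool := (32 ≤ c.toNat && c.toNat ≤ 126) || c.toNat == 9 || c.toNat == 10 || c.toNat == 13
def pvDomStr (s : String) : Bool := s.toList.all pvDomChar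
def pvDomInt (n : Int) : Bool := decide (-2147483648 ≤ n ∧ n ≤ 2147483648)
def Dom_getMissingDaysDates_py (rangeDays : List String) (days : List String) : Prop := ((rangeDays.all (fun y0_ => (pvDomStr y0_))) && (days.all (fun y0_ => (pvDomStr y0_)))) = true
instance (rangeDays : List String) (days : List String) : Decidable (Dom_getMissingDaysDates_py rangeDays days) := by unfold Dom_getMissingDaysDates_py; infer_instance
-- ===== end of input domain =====

-- B replaces A's present/missing state machine with direct extraction of maximal
-- missing runs (objective: alternative decomposition; no speed claim).

-- ===== PORT A =====
-- A's loop body (kept as a helper): state = (retDays, start/end pending run or none)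
def pvStepA (dset : PySem.Set String) (st : List (List String) × Option (String × String))
    (day : String) : List (List String) × Option (String × String) :=
  match st.2 with
  | none =>
      if !(PySem.Set.contains dset day) then (st.1, some (day, day)) else st
  | some (s, e) =>
      if !(PySem.Set.contains dset day) then (st.1, some (s, day))
      else (st.1 ++ [[s, e]], none)

-- the trailing 'if start is not None' flush
def pvFinA (st : List (List String) × Option (String × String)) : List (List String) :=
  match st.2 with
  | none => st.1
  | some (s, e) => st.1 ++ [[s, e]]

def getMissingDaysDates_py (rangeDays : List String) (days : List String) : List (List String) :=
  let dset := PySem.Set.ofList days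
  pvFinA (rangeDays.foldl (pvStepA dset) ([], none))

-- ===== PORT B =====
-- Source B's index walk rendered as recursion on the remaining suffix: rangeDays[i] is the head,
-- the inner j-scan over missing days is the takeWhile, resuming at i = j+1 is the dropWhile
def pvRunsB (dset : PySem.Set String) : List String → List (List String)
  | [] => []
  | d :: rest =>
      if PySem.Set.contains dset d = true then pvRunsB dset rest
      else
        let run := d :: rest.takeWhile (fun x => !(PySem.Set.contains dset x))  -- rangeDays[i..j]
        -- append [rangeDays[i], rangeDays[j]], continue at i = j+1
        [d, run.getLastD ""] :: pvRunsB dset (rest.dropWhile (fun x => !(PySem.Set.contains dset x)))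
termination_by l => l.length
decreasing_by
  · simp only [List.length_cons]; omega
  · have := List.length_dropWhile_le (fun x => !(PySem.Set.contains dset x)) rest
    simp only [List.length_cons]; omega

def getMissingDaysDates_py_alt (rangeDays : List String) (days : List String) : List (List String) :=
  pvRunsB (PySem.Set.ofList days) rangeDays

-- ===== PRECONDITION & SPEC =====
def Spec_getMissingDaysDates_py (rangeDays : List String) (days : List String) (out : List (List String)) : Prop := out = getMissingDaysDates_py_alt rangeDays days
instance (rangeDays : List String) (days : List String) (out : List (List String)) : Decidable (Spec_getMissingDaysDates_py rangeDays days out) := by unfold Spec_getMissingDaysDates_py; infer_instance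

-- ===== CLAIM (what is proved, stated in full; the proofs are below) =====
def Claim_equal_getMissingDaysDates_py : Prop := ∀ (rangeDays : List String) (days : List String), Dom_getMissingDaysDates_py rangeDays days → Spec_getMissingDaysDates_py rangeDays days (getMissingDaysDates_py rangeDays days)

-- ===== LEMMAS AND PROOFS =====

theorem pvRunsB_nil (dset : PySem.Set String) : pvRunsB dset [] = [] := by
  rw [pvRunsB.eq_def]

theorem pvRunsB_cons (dset : PySem.Set String) (d : String) (t : List String) :
    pvRunsB dset (d :: t) =
      if PySem.Set.contains dset d = true then pvRunsB dset t
      else [d, (d :: t.takeWhile (fun x => !(PySem.Set.contains dset x))).getLastD ""] ::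
        pvRunsB dset (t.dropWhile (fun x => !(PySem.Set.contains dset x))) := by
  rw [pvRunsB.eq_def]

-- joint loop invariant: from the none-state the fold computes acc ++ runs;
-- from a pending (s, e)-state it first closes the run [s, last missing prefix ▸ e]
theorem pvFold_inv (dset : PySem.Set String) (l : List String) :
    (∀ acc, pvFinA (l.foldl (pvStepA dset) (acc, none)) = acc ++ pvRunsB dset l) ∧
    (∀ acc s e, pvFinA (l.foldl (pvStepA dset) (acc, some (s, e))) =
      acc ++ [[s, (l.takeWhile (fun x => !(PySem.Set.contains dset x))).getLastD e]]
          ++ pvRunsB dset (l.dropWhile (fun x => !(PySem.Set.contains dset x)))) := by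
  induction l with
  | nil =>
    refine ⟨fun acc => by simp [pvFinA, pvRunsB_nil], fun acc s e => ?_⟩
    simp [pvFinA, pvRunsB_nil]
  | cons d t ih =>
    by_cases h : PySem.Set.contains dset d = true
    · have hm : d ∈ dset := by simpa using h
      refine ⟨fun acc => ?_, fun acc s e => ?_⟩
      · rw [List.foldl_cons]
        have hstep : pvStepA dset (acc, none) d = (acc, none) := by simp [pvStepA, hm]
        rw [hstep, ih.1 acc, pvRunsB_cons, if_pos h]
      · rw [List.foldl_cons]
        have hstep : pvStepA dset (acc, some (s, e)) d = (acc ++ [[s, e]], none) := by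
          simp [pvStepA, hm]
        rw [hstep, ih.1 (acc ++ [[s, e]]), List.takeWhile_cons, List.dropWhile_cons]
        simp [hm, pvRunsB_cons]
    · have hm : d ∉ dset := by simpa using h
      refine ⟨fun acc => ?_, fun acc s e => ?_⟩
      · rw [List.foldl_cons]
        have hstep : pvStepA dset (acc, none) d = (acc, some (d, d)) := by simp [pvStepA, hm]
        rw [hstep, ih.2 acc d d, pvRunsB_cons, if_neg h, List.getLastD_cons]
        simp
      · rw [List.foldl_cons]
        have hstep : pvStepA dset (acc, some (s, e)) d = (acc, some (s, d)) := by
          simp [pvStepA, hm]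
        rw [hstep, ih.2 acc s d, List.takeWhile_cons, List.dropWhile_cons]
        simp [hm, List.getLast?_cons, List.getLastD_eq_getLast?]

-- ===== VERDICT (by name: the statement is the Claim_ definition above) =====
theorem getMissingDaysDates_py_spec : Claim_equal_getMissingDaysDates_py := by
  intro rangeDays days _
  unfold Spec_getMissingDaysDates_py getMissingDaysDates_py getMissingDaysDates_py_alt
  simpa using (pvFold_inv (PySem.Set.ofList days) rangeDays).1 []
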